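-- pv_equiv track=rewrite | github.com/drgsystems/codesignal | python/reverseInParentheses.py | solution
-- ===== SOURCE A (Python) =====
-- def solution(inputString):
-- 	char =list(inputString)
-- 	open_bracket = []
-- 	for i,c in enumerate(char):
-- 		if c == '(':
-- 			open_bracket.append(i)
-- 		elif c == ')':
-- 			j = open_bracket.pop()
-- 			char[j:i] = char[i:j:-1]
-- 	return ''.join(c for c in char if c not in '()')
-- ===== SOURCE B (Python) =====
-- def solution(inputString):
--     # Stack of per-level buffers: push on '(', on ')' pop the top buffer,
--     # reverse it and append it to the buffer below; concatenate at the end.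
--     stack = [[]]
--     for c in inputString:
--         if c == '(':
--             stack.append([])
--         elif c == ')':
--             seg = stack.pop()
--             seg.reverse()
--             stack[-1].extend(seg)
--         else:
--             stack[-1].append(c)
--     return ''.join(''.join(s) for s in stack)
-- ===== Notes on version B (the rewrite author's own statement) =====
-- stated objective: alternative
-- what changed: Replaced A's repeated in-place slice reversal of the character array (each ')' rewrites the bracketed span inside the full list) with a single pass over a stack of per-level buffers that pops, reverses and appends each segment once, then concatenates the stack.
import Mathlib
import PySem

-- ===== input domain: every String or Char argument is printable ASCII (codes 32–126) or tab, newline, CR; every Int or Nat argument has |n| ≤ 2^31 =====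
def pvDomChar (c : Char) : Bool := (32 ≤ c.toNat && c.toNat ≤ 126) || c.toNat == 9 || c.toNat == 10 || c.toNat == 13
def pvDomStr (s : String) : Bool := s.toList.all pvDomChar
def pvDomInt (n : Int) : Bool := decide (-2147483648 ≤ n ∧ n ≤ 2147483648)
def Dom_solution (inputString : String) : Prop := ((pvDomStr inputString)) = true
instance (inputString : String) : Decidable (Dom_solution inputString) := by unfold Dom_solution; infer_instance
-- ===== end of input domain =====

-- B replaces A's in-place slice reversals inside the full character array by a stack of
-- per-level buffers (pop/reverse/append per ')'); proved equal wherever A does not raise.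

-- ===== PORT A =====
-- ''.join(c for c in char if c not in '()')
def stripParens (cs : List Char) : List Char := cs.filter (fun c => !(c == '(' || c == ')'))

-- loop body of A; indices from enumerate are Ints, here always ≥ 0, so .toNat is exact.
-- char[j:i] = char[i:j:-1]  (0 ≤ j < i < len) is hand-ported:
-- positions j..i-1 become the reverse of positions j+1..i — exact for these index ranges.
def stepA (st : List Char × List Int) (ic : Int × Char) : List Char × List Int :=
  if ic.2 = '(' then (st.1, ic.1 :: st.2)
  else if ic.2 = ')' then
    match st.2 with
    | j :: ob =>
        (st.1.take j.toNat
          ++ ((st.1.drop (j.toNat + 1)).take (ic.1.toNat - j.toNat)).reverse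
          ++ st.1.drop ic.1.toNat, ob)
    | [] => (st.1, [])   -- Python raises IndexError here; excluded by Pre_solution
  else st

def solution (inputString : String) : String :=
  String.ofList (stripParens
    ((PySem.List.enumerate inputString.toList).foldl stepA (inputString.toList, [])).1)

-- ===== PORT B =====
def stepB (stack : List (List Char)) (c : Char) : List (List Char) :=
  if c = '(' then [] :: stack
  else if c = ')' then
    match stack with
    | seg :: top :: rest => (top ++ seg.reverse) :: rest
    | _ => []   -- Python raises IndexError here; excluded by Pre_solution
  else
    match stack with
    | top :: rest => (top ++ [c]) :: rest
    | [] => []   -- unreachable: the stack is never empty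

def solution_alt (inputString : String) : String :=
  String.ofList ((inputString.toList.foldl stepB [[]]).reverse.flatten)

-- ===== PRECONDITION & SPEC =====
-- Pre_ excludes exactly the strings with a prefix containing more ')' than '(' :
-- there A (and B) raise IndexError popping an empty stack.
def Pre_solution (inputString : String) : Prop :=
  ∀ n ∈ List.range (inputString.toList.length + 1),
    (inputString.toList.take n).count ')' ≤ (inputString.toList.take n).count '('
instance (inputString : String) : Decidable (Pre_solution inputString) := by
  unfold Pre_solution; infer_instance

def pvWitness_solution : String := "a(bc(de)f)g"

def Spec_solution (inputString : String) (out : String) : Prop := out = solution_alt inputString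
instance (inputString : String) (out : String) : Decidable (Spec_solution inputString out) := by unfold Spec_solution; infer_instance

-- ===== CLAIM (what is proved, stated in full; the proofs are below) =====
def Claim_equal_solution : Prop := ∀ (inputString : String), Dom_solution inputString → Pre_solution inputString → Spec_solution inputString (solution inputString)

-- ===== LEMMAS AND PROOFS =====

-- glueR rs: the processed prefix of A's char array, reconstructed from the segment stack
-- rs (head = innermost open segment): segments joined bottom-up by the '(' still present.
def glueR : List (List Char) → List Char
  | [] => []
  | [t] => t
  | t :: ts => glueR ts ++ '(' :: t

-- obOfR rs: A's open_bracket stack (head = top): the positions of the gluing '(' chars.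
def obOfR : List (List Char) → List Int
  | [] => []
  | [_] => []
  | _ :: ts => ((glueR ts).length : Int) :: obOfR ts

lemma glueR_cons (t u : List Char) (ts : List (List Char)) :
    glueR (t :: u :: ts) = glueR (u :: ts) ++ '(' :: t := rfl

lemma obOfR_cons (t u : List Char) (ts : List (List Char)) :
    obOfR (t :: u :: ts) = ((glueR (u :: ts)).length : Int) :: obOfR (u :: ts) := rfl

lemma stepA_open (st : List Char × List Int) (i : Int) :
    stepA st (i, '(') = (st.1, i :: st.2) := by simp [stepA]

lemma stepA_close (chars : List Char) (j : Int) (ob : List Int) (i : Int) :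
    stepA (chars, j :: ob) (i, ')') =
      (chars.take j.toNat ++ ((chars.drop (j.toNat + 1)).take (i.toNat - j.toNat)).reverse
        ++ chars.drop i.toNat, ob) := by simp [stepA]

lemma stepA_other (st : List Char × List Int) (i : Int) (c : Char)
    (h1 : c ≠ '(') (h2 : c ≠ ')') : stepA st (i, c) = st := by simp [stepA, h1, h2]

lemma stepB_open (stack : List (List Char)) : stepB stack '(' = [] :: stack := by simp [stepB]

lemma stepB_close' (seg top : List Char) (rest : List (List Char)) :
    stepB (seg :: top :: rest) ')' = (top ++ seg.reverse) :: rest := by simp [stepB]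

lemma stepB_other (top : List Char) (rest : List (List Char)) (c : Char)
    (h1 : c ≠ '(') (h2 : c ≠ ')') : stepB (top :: rest) c = (top ++ [c]) :: rest := by
  simp [stepB, h1, h2]

lemma strip_append (l m : List Char) : stripParens (l ++ m) = stripParens l ++ stripParens m := by
  simp [stripParens]

-- final assembly: stripping A's processed array = concatenating B's stack bottom-up
lemma strip_glueR (rs : List (List Char)) :
    stripParens (glueR rs) = ((rs.map stripParens).reverse).flatten := by
  induction rs with
  | nil => rfl
  | cons t ts ih =>
    cases ts with
    | nil => simp [glueR, stripParens]
    | cons u ts' =>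
      rw [glueR_cons, strip_append]
      simp only [List.map_cons, List.reverse_cons, List.flatten_append] at ih ⊢
      rw [ih]
      simp [stripParens]

-- the balanced-prefix invariant tells how many segments are open
lemma bal_prefix_step (p rest' : List Char)
    (hbal : ∀ n ∈ List.range ((p ++ ')' :: rest').length + 1),
      ((p ++ ')' :: rest').take n).count ')' ≤ ((p ++ ')' :: rest').take n).count '(') :
    p.count ')' + 1 ≤ p.count '(' := by
  have h := hbal (p.length + 1) (by simp [List.mem_range])
  have ht : (p ++ ')' :: rest').take (p.length + 1) = p ++ [')'] := by
    rw [List.take_append]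
    simp
  rw [ht] at h
  simp [List.count_append] at h
  omega

-- MAIN INVARIANT: running A's fold from a reconstructed state and B's fold from the
-- stripped stack over the same remaining characters lands in a common reconstructed state.
lemma main_inv : ∀ (rest p : List Char) (rs : List (List Char)), rs ≠ [] →
    (∀ n ∈ List.range ((p ++ rest).length + 1),
      ((p ++ rest).take n).count ')' ≤ ((p ++ rest).take n).count '(') →
    rs.length + p.count ')' = 1 + p.count '(' →
    p.length = (glueR rs).length →
    ∃ rs', rs' ≠ [] ∧
      (PySem.List.enumerate rest (p.length : Int)).foldl stepA (glueR rs ++ rest, obOfR rs)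
        = (glueR rs', obOfR rs') ∧
      rest.foldl stepB (rs.map stripParens) = rs'.map stripParens := by
  intro rest
  induction rest with
  | nil =>
    intro p rs hne _ _ _
    exact ⟨rs, hne, by simp [PySem.List.enumerate], rfl⟩
  | cons c rest' ih =>
    intro p rs hne hbal hcnt hlen
    obtain ⟨t, ts, rfl⟩ : ∃ t ts, rs = t :: ts := by
      cases rs with | nil => exact absurd rfl hne | cons a b => exact ⟨a, b, rfl⟩
    rw [PySem.List.enumerate_cons, List.foldl_cons, List.foldl_cons]
    by_cases hop : c = '('
    · subst hop
      rw [stepA_open, List.map_cons, stepB_open, ← List.map_cons]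
      have hg : glueR (t :: ts) ++ '(' :: rest' = glueR ([] :: t :: ts) ++ rest' := by
        simp [glueR_cons]
      rw [hg, show ((p.length : Int) :: obOfR (t :: ts)) = obOfR ([] :: t :: ts) by
        rw [obOfR_cons, hlen]]
      have := ih (p ++ ['(']) ([] :: t :: ts) (by simp)
        (by simpa using hbal)
        (by simp only [List.length_cons] at hcnt; simp [List.count_append]; omega)
        (by simp [glueR_cons]; omega)
      obtain ⟨rs', h1, h2, h3⟩ := this
      exact ⟨rs', h1, by simpa using h2, h3⟩
    · by_cases hcl : c = ')'
      · subst hcl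
        -- the stack has at least two segments
        have hk : p.count ')' + 1 ≤ p.count '(' := bal_prefix_step p rest' hbal
        obtain ⟨u, ts', rfl⟩ : ∃ u ts', ts = u :: ts' := by
          cases ts with
          | nil => exfalso; simp at hcnt; omega
          | cons a b => exact ⟨a, b, rfl⟩
        set j : Nat := (glueR (u :: ts')).length with hj
        have hglue : glueR (t :: u :: ts') = glueR (u :: ts') ++ '(' :: t := rfl
        have hi : p.length = j + 1 + t.length := by
          rw [hlen, hglue]; simp [hj]; omega
        set rs2 : List (List Char) := (u ++ ')' :: t.reverse ++ [')']) :: ts' with hrs2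
        have hglue2 : glueR rs2 = glueR (u :: ts') ++ ')' :: t.reverse ++ [')'] := by
          cases ts' with
          | nil => simp [hrs2, glueR]
          | cons v vs => simp [hrs2, glueR_cons, glueR]
        have hob2 : obOfR rs2 = obOfR (u :: ts') := by
          cases ts' with
          | nil => rfl
          | cons v vs => rfl
        rw [obOfR_cons, stepA_close]
        have e1 : (((j : Int))).toNat = j := by simp
        have e2 : (((p.length : Nat) : Int)).toNat = p.length := by simp
        have htake : (glueR (t :: u :: ts') ++ ')' :: rest').take j = glueR (u :: ts') := by
          rw [hglue, List.append_assoc, hj, List.take_append]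
          simp
        have hdrop1 : (glueR (t :: u :: ts') ++ ')' :: rest').drop (j + 1)
            = t ++ ')' :: rest' := by
          rw [hglue, List.append_assoc, hj, List.drop_append]
          simp
        have hdropi : (glueR (t :: u :: ts') ++ ')' :: rest').drop p.length
            = ')' :: rest' := by
          have hpl : p.length = (glueR (t :: u :: ts')).length := hlen
          rw [hpl, List.drop_append]
          simp
        have hmid : (t ++ ')' :: rest').take (p.length - j) = t ++ [')'] := by
          have : p.length - j = t.length + 1 := by omega
          rw [this, List.take_append]
          simp
        have hA : glueR (u :: ts')
              ++ ((t ++ [')']).reverse)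
              ++ ')' :: rest' = glueR rs2 ++ rest' := by
          rw [hglue2]
          simp
        rw [e1, e2, htake, hdrop1, hdropi, hmid, hA]
        rw [List.map_cons, List.map_cons, stepB_close']
        have hB : (stripParens u ++ (stripParens t).reverse) :: ts'.map stripParens
            = rs2.map stripParens := by
          rw [hrs2, List.map_cons]
          rw [show stripParens (u ++ ')' :: t.reverse ++ [')'])
                = stripParens u ++ (stripParens t).reverse by
            rw [strip_append, strip_append]
            simp [stripParens]]
        rw [hB, ← hob2]
        have := ih (p ++ [')']) rs2 (by simp [hrs2])
          (by simpa using hbal)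
          (by simp only [List.length_cons] at hcnt; simp [hrs2, List.count_append]; omega)
          (by rw [hglue2]; simp; omega)
        obtain ⟨rs', h1, h2, h3⟩ := this
        exact ⟨rs', h1, by simpa using h2, h3⟩
      · -- ordinary character
        set rs2 : List (List Char) := (t ++ [c]) :: ts with hrs2
        have hglue2 : glueR rs2 = glueR (t :: ts) ++ [c] := by
          cases ts with
          | nil => simp [hrs2, glueR]
          | cons v vs => simp [hrs2, glueR_cons]
        have hob2 : obOfR rs2 = obOfR (t :: ts) := by
          cases ts with
          | nil => rfl
          | cons v vs => rfl
        rw [stepA_other _ _ _ hop hcl, List.map_cons, stepB_other _ _ _ hop hcl]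
        rw [show glueR (t :: ts) ++ c :: rest' = glueR rs2 ++ rest' by
          rw [hglue2]; simp]
        rw [show obOfR (t :: ts) = obOfR rs2 from hob2.symm]
        have hBs : (stripParens t ++ [c]) :: ts.map stripParens = rs2.map stripParens := by
          rw [hrs2, List.map_cons]
          rw [show stripParens (t ++ [c]) = stripParens t ++ [c] by
            rw [strip_append]; simp [stripParens, hop, hcl]]
        rw [hBs]
        have := ih (p ++ [c]) rs2 (by simp [hrs2])
          (by simpa using hbal)
          (by simp only [List.length_cons] at hcnt; simp [hrs2, List.count_append, hop, hcl]; omega)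
          (by rw [hglue2]; simp; omega)
        obtain ⟨rs', h1, h2, h3⟩ := this
        exact ⟨rs', h1, by simpa using h2, h3⟩

-- ===== VERDICT (by name: the statement is the Claim_ definition above) =====
theorem solution_spec : Claim_equal_solution := by
  intro s _ hpre
  unfold Spec_solution solution solution_alt
  obtain ⟨rs', hne, hA, hB⟩ := main_inv s.toList [] [[]] (by simp)
    (by simpa [Pre_solution] using hpre) (by simp) (by simp [glueR])
  simp only [List.length_nil, Int.natCast_zero] at hA
  have hA' : (PySem.List.enumerate s.toList 0).foldl stepA (s.toList, []) = (glueR rs', obOfR rs') := by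
    have : glueR [[]] ++ s.toList = s.toList := by simp [glueR]
    rw [← this]
    simpa [obOfR] using hA
  have hB' : s.toList.foldl stepB [[]] = rs'.map stripParens := by
    simpa [stripParens] using hB
  rw [hA', hB']
  simp [strip_glueR rs']
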